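-- pv_equiv track=rewrite | github.com/AlanFermat/leetcode | array + Design/cost_of_modules.py | init_graph
-- ===== SOURCE A (Python) =====
-- def init_graph(input):
-- 	g = {}
-- 	nodes_cost = {}
-- 	for nodes in input:
-- 		nodes_list = nodes.split(",")
-- 		parent = nodes_list[0]
-- 		if nodes_cost.get(parent) is None:
-- 			nodes_cost[parent] = 1
-- 		if g.get(parent) is None:
-- 			g[parent] = []
-- 		for child in nodes_list[1:]:
-- 			g[parent].append(child)
-- 			if nodes_cost.get(child) is None:
-- 				nodes_cost[child] = 1
-- 	return g, nodes_cost
-- ===== SOURCE B (Python) =====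
-- def init_graph(input):
--     if not input:
--         return {}, {}
--     if len(input) == 1:
--         toks = input[0].split(",")
--         return {toks[0]: toks[1:]}, {t: 1 for t in toks}
--     mid = len(input) // 2
--     gl, ncl = init_graph(input[:mid])
--     gr, ncr = init_graph(input[mid:])
--     g = {}
--     for k, v in gl.items():
--         g[k] = v + gr.get(k, [])
--     for k, v in gr.items():
--         if k not in g:
--             g[k] = v
--     nc = dict(ncl)
--     for k in ncr:
--         if k not in nc:
--             nc[k] = 1
--     return g, nc
-- ===== Notes on version B (the rewrite author's own statement) =====
-- stated objective: alternative
-- what changed: B replaces A's single left-to-right pass with a divide-and-conquer recursion: it splits the line list in half, recursively builds (graph, cost) for each half, and merges the two partial results (concatenating child lists for shared parents, appending right-only keys), which yields the identical dicts including insertion order.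
import Mathlib
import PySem

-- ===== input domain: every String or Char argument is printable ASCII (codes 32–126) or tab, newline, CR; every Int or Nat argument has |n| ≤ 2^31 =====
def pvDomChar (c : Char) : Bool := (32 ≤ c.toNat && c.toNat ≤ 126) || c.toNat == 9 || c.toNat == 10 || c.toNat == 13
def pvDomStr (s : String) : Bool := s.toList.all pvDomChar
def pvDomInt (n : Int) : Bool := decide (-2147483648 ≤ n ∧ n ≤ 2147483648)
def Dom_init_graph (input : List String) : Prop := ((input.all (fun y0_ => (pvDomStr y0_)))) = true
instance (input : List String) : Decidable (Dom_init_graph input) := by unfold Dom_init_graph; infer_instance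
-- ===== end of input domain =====

-- B rebuilds the same (graph, cost) pair by divide and conquer: split the line list in half,
-- recurse, and merge the two partial results in order (objective: alternative).


-- ===== PORT A =====
-- per-line body of A's loop: conditionally seed nodes_cost[parent] and g[parent],
-- then for each child append to g[parent] and conditionally seed nodes_cost[child]
def stepA (st : PySem.Dict String (List String) × PySem.Dict String Int) (nodes : String) :
    PySem.Dict String (List String) × PySem.Dict String Int :=
  -- nodes.split(","): sep is the literal "," ≠ "", so split? is always `some`
  match (PySem.Str.split? nodes ",").getD [] with
  | [] => st            -- unreachable: Python's split on "," never returns an empty list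
  | parent :: children =>
    let nc := if st.2.get? parent = none then st.2.insert parent 1 else st.2
    let g  := if st.1.get? parent = none then st.1.insert parent ([] : List String) else st.1
    children.foldl (fun p child =>
      (p.1.modify parent [] (· ++ [child]),
       if p.2.get? child = none then p.2.insert child 1 else p.2)) (g, nc)

def init_graph (input : List String) : (List (String × List String)) × (List (String × Int)) :=
  let st := input.foldl stepA (PySem.Dict.empty, PySem.Dict.empty)
  (st.1.items, st.2.items)

-- ===== PORT B =====
-- merge of the two graph halves: g = {}; for k,v in gl: g[k] = v + gr.get(k,[]); then the
-- right-only keys of gr in order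
def mergeG (a b : PySem.Dict String (List String)) : PySem.Dict String (List String) :=
  let g := a.items.foldl (fun g p => g.insert p.1 (p.2 ++ b.getD p.1 [])) PySem.Dict.empty
  b.items.foldl (fun g p => if g.contains p.1 then g else g.insert p.1 p.2) g

-- merge of the two cost halves: nc = dict(ncl); for k in ncr: if k not in nc: nc[k] = 1
def mergeNC (a b : PySem.Dict String Int) : PySem.Dict String Int :=
  b.keys.foldl (fun d k => if d.contains k then d else d.insert k 1) a

-- divide and conquer: input[:mid] / input[mid:] with 0 ≤ mid ≤ len are List.take / List.drop (exact)
def init_graph_core : List String → PySem.Dict String (List String) × PySem.Dict String Int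
  | [] => (PySem.Dict.empty, PySem.Dict.empty)
  | [line] =>
    match (PySem.Str.split? line ",").getD [] with
    | [] => (PySem.Dict.empty, PySem.Dict.empty)   -- unreachable: split on "," is never empty
    | p :: cs =>
      (PySem.Dict.empty.insert p cs,
       (p :: cs).foldl (fun d t => d.insert t 1) PySem.Dict.empty)
  | l1 :: l2 :: rest =>
    let input := l1 :: l2 :: rest
    let mid := input.length / 2
    let L := init_graph_core (input.take mid)
    let R := init_graph_core (input.drop mid)
    (mergeG L.1 R.1, mergeNC L.2 R.2)
termination_by l => l.length
decreasing_by
  · simp [List.length_take]; omega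
  · simp [List.length_drop]; omega

def init_graph_alt (input : List String) : (List (String × List String)) × (List (String × Int)) :=
  let st := init_graph_core input
  (st.1.items, st.2.items)

-- ===== PRECONDITION & SPEC =====
def Spec_init_graph (input : List String) (out : (List (String × List String)) × (List (String × Int))) : Prop := out = init_graph_alt input
instance (input : List String) (out : (List (String × List String)) × (List (String × Int))) : Decidable (Spec_init_graph input out) := by unfold Spec_init_graph; infer_instance

-- ===== CLAIM (what is proved, stated in full; the proofs are below) =====
def Claim_equal_init_graph : Prop := ∀ (input : List String), Dom_init_graph input → Spec_init_graph input (init_graph input)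

-- ===== LEMMAS AND PROOFS =====

-- the tokens of one line, and its parent/children decomposition
def toksOf (line : String) : List String := (PySem.Str.split? line ",").getD []
def parentOf (line : String) : String := (toksOf line).headD ""
def childrenOf (line : String) : List String := (toksOf line).tail

theorem splitOn_go_ne_nil (sep : List Char) :
    ∀ (fuel : Nat) (l cur : List Char) (acc : List (List Char)),
      PySem.Chars.splitOn.go sep fuel l cur acc ≠ [] := by
  intro fuel
  induction fuel with
  | zero => intro l cur acc; rw [PySem.Chars.splitOn.go]; simp
  | succ n ih =>
    intro l cur acc
    cases l with
    | nil => rw [PySem.Chars.splitOn.go]; simp; omega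
    | cons c rest =>
      rw [PySem.Chars.splitOn.go]
      split
      · exact ih _ _ _
      · exact ih _ _ _

theorem toksOf_ne_nil (line : String) : toksOf line ≠ [] := by
  have h := splitOn_go_ne_nil [','] (line.toList.length + 1) line.toList [] []
  unfold toksOf
  simp only [PySem.Str.split?, PySem.Chars.split?, PySem.Chars.splitOn]
  simp_all

theorem toksOf_eq (line : String) : toksOf line = parentOf line :: childrenOf line := by
  cases h : toksOf line with
  | nil => exact absurd h (toksOf_ne_nil line)
  | cons p cs => simp [parentOf, childrenOf, h]

-- ===== A-side reduction: the paired fold is a graph fold and a flat token fold =====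

def gstep (g : PySem.Dict String (List String)) (line : String) : PySem.Dict String (List String) :=
  g.modify (parentOf line) [] (· ++ childrenOf line)

-- modify at the same key composes
theorem modify_modify_self (d : PySem.Dict String (List String)) (k : String)
    (f h : List String → List String) :
    (d.modify k [] f).modify k [] h = d.modify k [] (fun x => h (f x)) := by
  show ((d.insert k (f (d.getD k []))).insert k
      (h ((d.insert k (f (d.getD k []))).getD k []))) = d.insert k (h (f (d.getD k [])))
  rw [PySem.Dict.getD_insert_self, PySem.Dict.insert_insert_self]

-- A's inner append loop, started from a dict of the form `modify`, is one modify with ++ children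
theorem fold_append_modify (cs : List String) (d : PySem.Dict String (List String)) (k : String)
    (f : List String → List String) :
    cs.foldl (fun d c => d.modify k [] (· ++ [c])) (d.modify k [] f)
      = d.modify k [] (fun x => f x ++ cs) := by
  induction cs generalizing f with
  | nil => simp [List.foldl]
  | cons c cs ih =>
    simp only [List.foldl, modify_modify_self]
    rw [ih]
    congr 1
    funext x
    simp

-- re-inserting the value a key already holds changes nothing (keys Nodup)
theorem insert_get?_self (d : PySem.Dict String (List String)) (k : String) (v : List String)
    (hnd : d.keys.Nodup) (h : d.get? k = some v) : d.insert k v = d := by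
  apply PySem.Dict.ext
  rw [PySem.Dict.items_insert_of_contains]
  · have hmap : ∀ p ∈ d.items, (if p.1 == k then (k, v) else p) = p := by
      intro p hp
      by_cases hk : p.1 == k
      · have hk' : p.1 = k := by simpa using hk
        have hg := PySem.Dict.get?_of_mem_items d (k := p.1) (v := p.2) (by simpa using hp) hnd
        rw [hk', h] at hg
        have hv2 : p.2 = v := by injection hg.symm
        simp only [hk, if_pos]
        rw [← hk', ← hv2]
      · simp [hk]
    rw [List.map_congr_left hmap, List.map_id']
  · rw [PySem.Dict.contains_eq_isSome_get?, h]; rfl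

-- inserting 1 at a present key of an all-ones dict changes nothing
theorem insert_one_self (d : PySem.Dict String Int) (k : String)
    (hv : ∀ p ∈ d.items, p.2 = (1 : Int)) (h : ∃ v, d.get? k = some v) : d.insert k 1 = d := by
  obtain ⟨v, h⟩ := h
  apply PySem.Dict.ext
  rw [PySem.Dict.items_insert_of_contains]
  · have hmap : ∀ p ∈ d.items, (if p.1 == k then (k, (1 : Int)) else p) = p := by
      intro p hp
      by_cases hk : p.1 == k
      · have hk' : p.1 = k := by simpa using hk
        have h1 := hv p hp
        simp only [hk, if_pos]
        rw [← hk', ← h1]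
      · simp [hk]
    rw [List.map_congr_left hmap, List.map_id']
  · rw [PySem.Dict.contains_eq_isSome_get?, h]; rfl

-- A's conditional inserts = unconditional inserts when every stored value is 1
theorem nc_fold_eq (toks : List String) (d : PySem.Dict String Int)
    (hv : ∀ p ∈ d.items, p.2 = (1 : Int)) :
    toks.foldl (fun d t => if d.get? t = none then d.insert t 1 else d) d
      = toks.foldl (fun d t => d.insert t 1) d := by
  induction toks generalizing d with
  | nil => rfl
  | cons t ts ih =>
    have hstep : (if d.get? t = none then d.insert t 1 else d) = d.insert t 1 := by
      by_cases h : d.get? t = none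
      · simp [h]
      · rw [if_neg h, insert_one_self d t hv (Option.ne_none_iff_exists'.mp h)]
    simp only [List.foldl, hstep]
    exact ih _ (fun p hp => by
      rcases (PySem.Dict.mem_items_insert _ _ _ _).mp hp with h | h
      · rw [h]
      · exact hv p h.1)

-- all-ones is preserved by an unconditional token fold
theorem ones_fold (toks : List String) (d : PySem.Dict String Int)
    (hv : ∀ p ∈ d.items, p.2 = (1 : Int)) :
    ∀ p ∈ (toks.foldl (fun d t => d.insert t 1) d).items, p.2 = (1 : Int) := by
  induction toks generalizing d with
  | nil => exact hv
  | cons t ts ih =>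
    exact ih _ (fun p hp => by
      rcases (PySem.Dict.mem_items_insert _ _ _ _).mp hp with h | h
      · rw [h]
      · exact hv p h.1)

-- one line of A = a graph modify and an unconditional token fold
theorem step_eq (g : PySem.Dict String (List String)) (nc : PySem.Dict String Int) (line : String)
    (hnd : g.keys.Nodup) (hv : ∀ p ∈ nc.items, p.2 = (1 : Int)) :
    stepA (g, nc) line = (gstep g line, (toksOf line).foldl (fun d t => d.insert t 1) nc) := by
  unfold stepA gstep
  rw [show (PySem.Str.split? line ",").getD [] = toksOf line from rfl, toksOf_eq line]
  simp only
  rw [PySem.List.foldl_prod_mk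
    (f := fun (d : PySem.Dict String (List String)) child =>
      d.modify (parentOf line) [] fun x => x ++ [child])
    (g := fun (d : PySem.Dict String Int) child =>
      if d.get? child = none then d.insert child 1 else d)]
  rw [Prod.mk.injEq]
  constructor
  · -- graph component
    by_cases h : g.get? (parentOf line) = none
    · rw [if_pos h]
      have h0 : g.insert (parentOf line) ([] : List String)
          = g.modify (parentOf line) [] (fun x => x) := by
        show _ = g.insert (parentOf line) (g.getD (parentOf line) [])
        rw [PySem.Dict.getD_of_get?_eq_none g [] h]
      rw [h0, fold_append_modify]
    · rw [if_neg h]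
      obtain ⟨v, hvv⟩ := Option.ne_none_iff_exists'.mp h
      have hmod : g = g.modify (parentOf line) [] (fun _ => v) := by
        show g = g.insert (parentOf line) v
        rw [insert_get?_self g (parentOf line) v hnd hvv]
      conv_lhs => rw [hmod]
      rw [fold_append_modify]
      show g.insert (parentOf line) _ = g.insert (parentOf line) _
      rw [PySem.Dict.getD_of_get?_eq_some g [] hvv]
  · -- cost component
    have hflat : (childrenOf line).foldl
        (fun d t => if d.get? t = none then d.insert t 1 else d)
        (if nc.get? (parentOf line) = none then nc.insert (parentOf line) 1 else nc)
        = (parentOf line :: childrenOf line).foldl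
            (fun d t => if d.get? t = none then d.insert t 1 else d) nc := rfl
    rw [hflat, nc_fold_eq _ _ hv]

-- whole A fold, under the invariants
theorem A_fold_eq (input : List String) (g : PySem.Dict String (List String))
    (nc : PySem.Dict String Int) (hnd : g.keys.Nodup) (hv : ∀ p ∈ nc.items, p.2 = (1 : Int)) :
    input.foldl stepA (g, nc)
      = (input.foldl gstep g, (input.flatMap toksOf).foldl (fun d t => d.insert t 1) nc) := by
  induction input generalizing g nc with
  | nil => rfl
  | cons line rest ih =>
    simp only [List.foldl, List.flatMap_cons, List.foldl_append]
    rw [step_eq g nc line hnd hv]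
    exact ih _ _ (by
      unfold gstep
      rw [PySem.Dict.keys_modify]
      exact PySem.Dict.nodup_keys_insert _ _ _ hnd) (ones_fold _ _ hv)

-- ===== characterisation of A's two dicts =====

theorem A_g_keys (input : List String) :
    (input.foldl gstep PySem.Dict.empty).keys = PySem.Set.ofList (input.map parentOf) := by
  have h := PySem.Dict.keys_foldl_modify_key input parentOf ([] : List String)
      (fun _ x => (· ++ childrenOf x)) PySem.Dict.empty
  simpa [gstep, PySem.Dict.keys_empty, PySem.Set.update_nil_left] using h

theorem A_g_nodup (input : List String) :
    (input.foldl gstep PySem.Dict.empty).keys.Nodup := by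
  have h := PySem.Dict.nodup_keys_foldl_modify_key input parentOf ([] : List String)
      (fun _ x => (· ++ childrenOf x)) PySem.Dict.empty PySem.Dict.nodup_keys_empty
  simpa [gstep] using h

theorem A_g_getD (input : List String) (d : PySem.Dict String (List String)) (k : String) :
    (input.foldl gstep d).getD k []
      = d.getD k [] ++ (input.filter (fun l => parentOf l == k)).flatMap childrenOf := by
  induction input generalizing d with
  | nil => simp
  | cons line rest ih =>
    simp only [List.foldl, List.filter_cons]
    rw [ih]
    by_cases h : parentOf line = k
    · simp only [h, beq_self_eq_true, if_pos]
      unfold gstep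
      rw [h, PySem.Dict.getD_modify_self]
      simp
    · have hb : (parentOf line == k) = false := by simpa using h
      simp only [hb, if_neg Bool.false_ne_true]
      unfold gstep
      rw [PySem.Dict.getD_modify_of_ne _ _ _ (Ne.symm h)]

theorem A_nc_keys (flat : List String) (d : PySem.Dict String Int) :
    (flat.foldl (fun d t => d.insert t 1) d).keys = PySem.Set.update d.keys flat := by
  exact PySem.Dict.keys_foldl_insert flat (fun _ _ => (1 : Int)) d

theorem A_nc_nodup (flat : List String) :
    ((flat.foldl (fun d t => d.insert t 1) (PySem.Dict.empty : PySem.Dict String Int))).keys.Nodup := by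
  exact PySem.Dict.nodup_keys_foldl_insert flat (fun _ _ => (1 : Int)) _ PySem.Dict.nodup_keys_empty

-- ===== merge lemmas =====

-- a conditional-insert fold over pairs with distinct keys appends exactly the new entries
theorem cond_insert_pairs (ps : List (String × List String)) (g : PySem.Dict String (List String))
    (hnd : (ps.map Prod.fst).Nodup) :
    (ps.foldl (fun g p => if g.contains p.1 then g else g.insert p.1 p.2) g).items
      = g.items ++ ps.filter (fun p => !g.contains p.1) := by
  induction ps generalizing g with
  | nil => simp
  | cons p ps ih =>
    have hcons := List.nodup_cons.mp (by simpa using hnd :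
      (p.1 :: ps.map Prod.fst).Nodup)
    have hnd' : (ps.map Prod.fst).Nodup := hcons.2
    have hne : ∀ q ∈ ps, q.1 ≠ p.1 := by
      intro q hq h
      exact hcons.1 (h ▸ List.mem_map_of_mem hq)
    simp only [List.foldl, List.filter_cons]
    by_cases h : g.contains p.1
    · simp only [h, Bool.not_true, if_neg Bool.false_ne_true]
      exact ih g hnd'
    · have hb : g.contains p.1 = false := by simpa using h
      simp only [hb, Bool.not_false, if_neg Bool.false_ne_true]
      rw [ih _ hnd', PySem.Dict.items_insert_of_not_contains _ _ hb]
      rw [List.filter_congr (q := fun q => !g.contains q.1) ?_]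
      · simp
      · intro q hq
        rw [PySem.Dict.contains_insert]
        have hq1 : (q.1 == p.1) = false := by simpa using hne q hq
        rw [hq1]
        simp

-- same, over a key list with value 1
theorem cond_insert_keys (ks : List String) (d : PySem.Dict String Int) (hnd : ks.Nodup) :
    (ks.foldl (fun d k => if d.contains k then d else d.insert k 1) d).items
      = d.items ++ (ks.filter (fun k => !d.contains k)).map (fun k => (k, (1 : Int))) := by
  induction ks generalizing d with
  | nil => simp
  | cons k ks ih =>
    have hcons := List.nodup_cons.mp hnd
    simp only [List.foldl, List.filter_cons]
    by_cases h : d.contains k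
    · simp only [h, Bool.not_true, if_neg Bool.false_ne_true]
      exact ih d hcons.2
    · have hb : d.contains k = false := by simpa using h
      simp only [hb, Bool.not_false, if_neg Bool.false_ne_true]
      rw [ih _ hcons.2, PySem.Dict.items_insert_of_not_contains _ _ hb]
      rw [List.filter_congr (q := fun q => !d.contains q) ?_]
      · simp
      · intro q hq
        have hqk : (q == k) = false := by
          simp only [beq_eq_false_iff_ne, ne_eq]
          intro hEq; exact hcons.1 (hEq ▸ hq)
        rw [PySem.Dict.contains_insert, hqk]
        simp

theorem mergeG_items (a b : PySem.Dict String (List String))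
    (ha : a.keys.Nodup) (hb : b.keys.Nodup) :
    (mergeG a b).items
      = a.items.map (fun p => (p.1, p.2 ++ b.getD p.1 []))
        ++ b.items.filter (fun p => !a.contains p.1) := by
  unfold mergeG
  have hndA : (a.items.map Prod.fst).Nodup := by simpa [PySem.Dict.keys] using ha
  have hndB : (b.items.map Prod.fst).Nodup := by simpa [PySem.Dict.keys] using hb
  have h1 := PySem.Dict.items_foldl_insert_fresh a.items Prod.fst
      (fun p => p.2 ++ b.getD p.1 []) PySem.Dict.empty
      (fun p _ => PySem.Dict.contains_empty p.1) hndA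
  have hkeys : (a.items.foldl (fun g p => g.insert p.1 (p.2 ++ b.getD p.1 []))
      (PySem.Dict.empty : PySem.Dict String (List String))).keys = a.keys := by
    simp only [PySem.Dict.keys, h1]
    simp [List.map_map, PySem.Dict.empty]
  rw [cond_insert_pairs b.items _ hndB, h1]
  have hcont : ∀ p ∈ b.items,
      ((a.items.foldl (fun g p => g.insert p.1 (p.2 ++ b.getD p.1 []))
        (PySem.Dict.empty : PySem.Dict String (List String))).contains p.1 : Bool)
        = a.contains p.1 := by
    intro p _
    rw [PySem.Dict.contains_eq_decide_mem_keys, PySem.Dict.contains_eq_decide_mem_keys, hkeys]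
  rw [List.filter_congr (fun p hp => by rw [hcont p hp])]
  simp [PySem.Dict.empty]

theorem mergeG_keys (a b : PySem.Dict String (List String))
    (ha : a.keys.Nodup) (hb : b.keys.Nodup) :
    (mergeG a b).keys = a.keys ++ b.keys.filter (fun k => !a.contains k) := by
  simp only [PySem.Dict.keys, mergeG_items a b ha hb, List.map_append]
  congr 1
  · simp [List.map_map]
  · rw [List.filter_map]
    congr 1

theorem mergeG_nodup (a b : PySem.Dict String (List String))
    (ha : a.keys.Nodup) (hb : b.keys.Nodup) : (mergeG a b).keys.Nodup := by
  rw [mergeG_keys a b ha hb]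
  refine List.Nodup.append ha (hb.filter _) ?_
  intro k hk1 hk2
  have := List.of_mem_filter hk2
  have hkc : a.contains k = true := (PySem.Dict.contains_iff_mem_keys a k).mpr hk1
  simp [hkc] at this

theorem mergeG_getD (a b : PySem.Dict String (List String))
    (ha : a.keys.Nodup) (hb : b.keys.Nodup) (k : String) :
    (mergeG a b).getD k [] = a.getD k [] ++ b.getD k [] := by
  have hm := mergeG_items a b ha hb
  have hmnd := mergeG_nodup a b ha hb
  by_cases hA : a.contains k
  · obtain ⟨v, hv⟩ : ∃ v, a.get? k = some v := by
      rw [PySem.Dict.contains_eq_isSome_get?] at hA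
      exact Option.isSome_iff_exists.mp hA
    have hmem : (k, v ++ b.getD k []) ∈ (mergeG a b).items := by
      rw [hm]
      exact List.mem_append_left _
        (List.mem_map_of_mem (PySem.Dict.mem_items_of_get?_eq_some a hv))
    rw [PySem.Dict.getD_of_mem_items _ hmem hmnd, PySem.Dict.getD_of_get?_eq_some a [] hv]
  · have hAf : a.contains k = false := by simpa using hA
    rw [PySem.Dict.getD_of_not_contains a [] hAf]
    by_cases hB : b.contains k
    · obtain ⟨v, hv⟩ : ∃ v, b.get? k = some v := by
        rw [PySem.Dict.contains_eq_isSome_get?] at hB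
        exact Option.isSome_iff_exists.mp hB
      have hmem : (k, v) ∈ (mergeG a b).items := by
        rw [hm]
        refine List.mem_append_right _ (List.mem_filter.mpr ⟨PySem.Dict.mem_items_of_get?_eq_some b hv, ?_⟩)
        simp [hAf]
      rw [PySem.Dict.getD_of_mem_items _ hmem hmnd, PySem.Dict.getD_of_get?_eq_some b [] hv]
      simp
    · have hBf : b.contains k = false := by simpa using hB
      have hmf : (mergeG a b).contains k = false := by
        rw [PySem.Dict.contains_eq_decide_mem_keys, mergeG_keys a b ha hb]
        simp only [decide_eq_false_iff_not, List.mem_append]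
        rintro (h | h)
        · exact absurd ((PySem.Dict.contains_iff_mem_keys a k).mpr h) (by simp [hAf])
        · exact absurd ((PySem.Dict.contains_iff_mem_keys b k).mpr (List.mem_of_mem_filter h)) (by simp [hBf])
      rw [PySem.Dict.getD_of_not_contains _ [] hmf, PySem.Dict.getD_of_not_contains b [] hBf]
      simp

theorem mergeNC_items (a b : PySem.Dict String Int) (hb : b.keys.Nodup) :
    (mergeNC a b).items
      = a.items ++ (b.keys.filter (fun k => !a.contains k)).map (fun k => (k, (1 : Int))) := by
  unfold mergeNC
  exact cond_insert_keys b.keys a hb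

theorem mergeNC_keys (a b : PySem.Dict String Int) (hb : b.keys.Nodup) :
    (mergeNC a b).keys = a.keys ++ b.keys.filter (fun k => !a.contains k) := by
  simp only [PySem.Dict.keys, mergeNC_items a b hb, List.map_append, List.map_map]
  congr 1
  simp [Function.comp_def]

theorem mergeNC_ones (a b : PySem.Dict String Int) (hb : b.keys.Nodup)
    (hv : ∀ p ∈ a.items, p.2 = (1 : Int)) :
    ∀ p ∈ (mergeNC a b).items, p.2 = (1 : Int) := by
  intro p hp
  rw [mergeNC_items a b hb] at hp
  rcases List.mem_append.mp hp with h | h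
  · exact hv p h
  · obtain ⟨k, _, hk⟩ := List.mem_map.mp h
    rw [← hk]


-- ===== characterisation of B's core =====

theorem core_char (input : List String) :
    (init_graph_core input).1.keys = PySem.Set.ofList (input.map parentOf)
    ∧ (∀ k, (init_graph_core input).1.getD k []
          = (input.filter (fun l => parentOf l == k)).flatMap childrenOf)
    ∧ (init_graph_core input).2.keys = PySem.Set.ofList (input.flatMap toksOf)
    ∧ (∀ p ∈ (init_graph_core input).2.items, p.2 = (1 : Int)) := by
  induction input using init_graph_core.induct with
  | case1 =>
    refine ⟨?_, ?_, ?_, ?_⟩ <;>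
      simp [init_graph_core, PySem.Dict.keys, PySem.Dict.empty, PySem.Dict.getD, PySem.Dict.get?]
  | case2 line heq => exact absurd heq (toksOf_ne_nil line)
  | case3 line p cs heq =>
    have hto : toksOf line = p :: cs := heq
    have hp : parentOf line = p := by rw [parentOf, hto]; rfl
    have hc : childrenOf line = cs := by rw [childrenOf, hto]; rfl
    have hcore : init_graph_core [line]
        = (PySem.Dict.empty.insert p cs,
           (p :: cs).foldl (fun d t => d.insert t 1) PySem.Dict.empty) := by
      rw [init_graph_core, heq]
    rw [hcore]
    refine ⟨?_, ?_, ?_, ?_⟩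
    · rw [PySem.Dict.keys_insert_of_not_contains _ _ (PySem.Dict.contains_empty p)]
      simp [hp, PySem.Dict.keys, PySem.Dict.empty, PySem.Set.ofList_cons, PySem.Set.discard]
    · intro k
      rw [PySem.Dict.getD_insert]
      by_cases hk : k = p
      · simp [hk, hp, hc]
      · have hb : (parentOf line == k) = false := by simp [hp]; exact fun h => hk h.symm
        simp [hk, hb, PySem.Dict.getD_empty]
    · rw [A_nc_keys, show (PySem.Dict.empty : PySem.Dict String Int).keys = [] from rfl,
        PySem.Set.update_nil_left]
      simp [hto]
    · exact ones_fold _ _ (by simp [PySem.Dict.empty])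
  | case4 l1 l2 rest inp mid ihL ihR =>
    obtain ⟨ihLk, ihLg, ihLnk, ihLo⟩ := ihL
    obtain ⟨ihRk, ihRg, ihRnk, ihRo⟩ := ihR
    simp only [show mid = (l1 :: l2 :: rest).length / 2 from rfl,
      show inp = l1 :: l2 :: rest from rfl] at ihLk ihLg ihLnk ihLo ihRk ihRg ihRnk ihRo
    have hcore : init_graph_core (l1 :: l2 :: rest)
        = (mergeG (init_graph_core ((l1 :: l2 :: rest).take ((l1 :: l2 :: rest).length / 2))).1
                  (init_graph_core ((l1 :: l2 :: rest).drop ((l1 :: l2 :: rest).length / 2))).1,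
           mergeNC (init_graph_core ((l1 :: l2 :: rest).take ((l1 :: l2 :: rest).length / 2))).2
                   (init_graph_core ((l1 :: l2 :: rest).drop ((l1 :: l2 :: rest).length / 2))).2) := by
      rw [init_graph_core]
    have ndLg : (init_graph_core ((l1 :: l2 :: rest).take ((l1 :: l2 :: rest).length / 2))).1.keys.Nodup := by
      rw [ihLk]; exact PySem.Set.nodup_ofList _
    have ndRg : (init_graph_core ((l1 :: l2 :: rest).drop ((l1 :: l2 :: rest).length / 2))).1.keys.Nodup := by
      rw [ihRk]; exact PySem.Set.nodup_ofList _
    have ndLn : (init_graph_core ((l1 :: l2 :: rest).take ((l1 :: l2 :: rest).length / 2))).2.keys.Nodup := by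
      rw [ihLnk]; exact PySem.Set.nodup_ofList _
    have ndRn : (init_graph_core ((l1 :: l2 :: rest).drop ((l1 :: l2 :: rest).length / 2))).2.keys.Nodup := by
      rw [ihRnk]; exact PySem.Set.nodup_ofList _
    rw [hcore]
    refine ⟨?_, ?_, ?_, ?_⟩
    · rw [mergeG_keys _ _ ndLg ndRg, ihLk, ihRk]
      conv_rhs => rw [← List.take_append_drop ((l1 :: l2 :: rest).length / 2) (l1 :: l2 :: rest)]
      rw [List.map_append, PySem.Set.ofList_append, PySem.Set.update_eq_append_filter]
      congr 1
      apply List.filter_congr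
      intro k _
      rw [PySem.Dict.contains_eq_decide_mem_keys, ihLk,
        PySem.Set.contains_eq_listContains, List.contains_eq_mem]
    · intro k
      rw [mergeG_getD _ _ ndLg ndRg k, ihLg k, ihRg k, ← List.flatMap_append, ← List.filter_append,
        List.take_append_drop]
    · rw [mergeNC_keys _ _ ndRn, ihLnk, ihRnk]
      conv_rhs => rw [← List.take_append_drop ((l1 :: l2 :: rest).length / 2) (l1 :: l2 :: rest)]
      rw [List.flatMap_append, PySem.Set.ofList_append, PySem.Set.update_eq_append_filter]
      congr 1
      apply List.filter_congr
      intro k _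
      rw [PySem.Dict.contains_eq_decide_mem_keys, ihLnk,
        PySem.Set.contains_eq_listContains, List.contains_eq_mem]
    · exact mergeNC_ones _ _ ndRn ihLo

-- all-ones dict with known keys has determined items
theorem ones_items (d : PySem.Dict String Int) (hnd : d.keys.Nodup)
    (hv : ∀ p ∈ d.items, p.2 = (1 : Int)) :
    d.items = d.keys.map (fun k => (k, (1 : Int))) := by
  rw [PySem.Dict.items_eq_map_keys d hnd (1 : Int)]
  apply List.map_congr_left
  intro k hk
  cases h : d.get? k with
  | none => exact absurd hk ((PySem.Dict.get?_eq_none_iff_not_mem_keys d k).mp h)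
  | some v =>
    have h1 : v = 1 := hv (k, v) (PySem.Dict.mem_items_of_get?_eq_some d h)
    rw [PySem.Dict.getD_of_get?_eq_some d 1 h, h1]

-- ===== VERDICT (by name: the statement is the Claim_ definition above) =====
theorem init_graph_spec : Claim_equal_init_graph := by
  intro input _
  show init_graph input = init_graph_alt input
  unfold init_graph init_graph_alt
  obtain ⟨hk, hg, hnk, ho⟩ := core_char input
  rw [A_fold_eq input _ _ PySem.Dict.nodup_keys_empty (by simp [PySem.Dict.empty])]
  rw [Prod.mk.injEq]
  constructor
  · -- graph component
    have ndB : (init_graph_core input).1.keys.Nodup := by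
      rw [hk]; exact PySem.Set.nodup_ofList _
    rw [PySem.Dict.items_eq_map_keys _ (A_g_nodup input) ([] : List String),
      PySem.Dict.items_eq_map_keys _ ndB ([] : List String), A_g_keys input, hk]
    apply List.map_congr_left
    intro k _
    rw [A_g_getD input PySem.Dict.empty k, hg k, PySem.Dict.getD_empty]
    simp
  · -- cost component
    have ndA := A_nc_nodup (input.flatMap toksOf)
    have ndB : (init_graph_core input).2.keys.Nodup := by
      rw [hnk]; exact PySem.Set.nodup_ofList _
    rw [ones_items _ ndA (ones_fold _ _ (by simp [PySem.Dict.empty])),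
      ones_items _ ndB ho, A_nc_keys,
      show (PySem.Dict.empty : PySem.Dict String Int).keys = [] from rfl,
      PySem.Set.update_nil_left, hnk]
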